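-- pv_equiv track=rewrite | github.com/cryptwhoa/cryptopals | 23_clone_mt19337.py | reverse_xor_leftshift_mask
-- ===== SOURCE A (Python) =====
-- def reverse_xor_leftshift_mask(y, shift, nbits, mask):
--         '''
--         solves an equation of the form "y = ((x << c) & mask) ^ x
--
--         args:
--                 y:      y in the above equation
--                 shift:  c in the above equation
--                 nbits:  number of bits in x and y in the above equation
--                 mask:   mask in above equation
--
--         returns:
--                 x such that ((x << c) & mask) ^ x = y
--         '''
--
--         x = 0
--         for b in range(nbits):
--                 if b < shift or not (mask & _BIT_0RIGHT(b)):
--                         x = x | (y & _BIT_0RIGHT(b))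
--                 elif mask & _BIT_0RIGHT(b):
--                         x = x | ((y & _BIT_0RIGHT(b)) ^ ((x << shift) & _BIT_0RIGHT(b)))
--
--         return x
--
-- def _BIT_0RIGHT(x):
--         '''
--         helper function, used for calculating masks
--
--         generates a value (b_x)(b_x-1)...b1b0 such that b_i = 0 for all i
--         except i=x
--         '''
--
--         return 1 << x
-- ===== SOURCE B (Python) =====
-- def reverse_xor_leftshift_mask(y, shift, nbits, mask):
--     full = (1 << nbits) - 1 if nbits > 0 else 0
--     if shift <= 0:
--         return y & full
--     v = y & full
--     m = mask & full
--     s = shift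
--     while s < nbits:
--         v ^= (v << s) & m
--         m &= m << s
--         s *= 2
--     return v
-- ===== Notes on version B (the rewrite author's own statement) =====
-- stated objective: faster
-- what changed: A reconstructs x one bit per loop iteration (nbits iterations, each building a single-bit mask); B untempers by shift doubling: it masks y and mask to nbits bits once and repeats v ^= (v<<s)&m; m &= m<<s; s *= 2, so only O(log(nbits/shift)) whole-number xor/and/shift operations are needed.
import Mathlib
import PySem

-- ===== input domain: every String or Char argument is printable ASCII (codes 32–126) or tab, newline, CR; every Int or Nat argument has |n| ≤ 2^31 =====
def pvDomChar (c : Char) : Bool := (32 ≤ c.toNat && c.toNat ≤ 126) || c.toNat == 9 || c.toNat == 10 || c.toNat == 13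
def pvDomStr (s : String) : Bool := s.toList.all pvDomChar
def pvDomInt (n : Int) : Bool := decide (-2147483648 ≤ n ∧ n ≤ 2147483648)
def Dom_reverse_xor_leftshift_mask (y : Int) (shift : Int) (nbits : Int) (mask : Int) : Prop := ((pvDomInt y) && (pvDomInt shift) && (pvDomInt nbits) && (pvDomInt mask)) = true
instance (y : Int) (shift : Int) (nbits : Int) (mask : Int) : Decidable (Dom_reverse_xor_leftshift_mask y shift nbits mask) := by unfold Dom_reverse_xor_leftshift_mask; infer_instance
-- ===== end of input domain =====

-- B replaces A's bit-at-a-time reconstruction (one loop iteration per bit) by the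
-- shift-doubling untempering identity, needing only O(log nbits) whole-number xor/and/shift steps.

-- ===== PORT A =====
-- literal transliteration of A: x = 0; for b in range(nbits): ... .
-- b.toNat is exact (b ∈ range(nbits) so 0 ≤ b); shift.toNat is exact whenever Python reaches
-- `x << shift` without raising (Pre_ excludes the raising inputs shift < 0 with a masked bit present).
def reverse_xor_leftshift_mask (y : Int) (shift : Int) (nbits : Int) (mask : Int) : Int :=
  (PySem.List.pyRange 0 nbits 1).foldl (fun x b =>
    if b < shift ∨ ¬ (PySem.Int.band mask ((1 : Int) <<< b.toNat) ≠ 0) then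
      PySem.Int.bor x (PySem.Int.band y ((1 : Int) <<< b.toNat))
    else if PySem.Int.band mask ((1 : Int) <<< b.toNat) ≠ 0 then
      PySem.Int.bor x (PySem.Int.bxor (PySem.Int.band y ((1 : Int) <<< b.toNat))
        (PySem.Int.band (x <<< shift.toNat) ((1 : Int) <<< b.toNat)))
    else x) 0

-- ===== PORT B =====
-- the while loop of Source B (v, m, s are the loop state; 1 ≤ s is the termination witness the
-- Lean recursion carries: the loop is only entered with s = shift ≥ 1 and s only doubles)
def pvAltLoop (nbits : Int) (v : Int) (m : Int) (s : Int) (hs : 1 ≤ s) : Int :=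
  if h : s < nbits then
    pvAltLoop nbits (PySem.Int.bxor v (PySem.Int.band (v <<< s.toNat) m))
      (PySem.Int.band m (m <<< s.toNat)) (2 * s) (by omega)
  else v
termination_by (nbits - s).toNat
decreasing_by omega

-- literal transliteration of Source B
def reverse_xor_leftshift_mask_alt (y : Int) (shift : Int) (nbits : Int) (mask : Int) : Int :=
  let full : Int := if 0 < nbits then ((1 : Int) <<< nbits.toNat) - 1 else 0
  if h : shift ≤ 0 then PySem.Int.band y full
  else pvAltLoop nbits (PySem.Int.band y full) (PySem.Int.band mask full) shift (by omega)

-- ===== PRECONDITION & SPEC =====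
-- Pre_ excludes exactly the inputs where Python A raises (ValueError from `x << shift` with
-- shift < 0, reached iff some bit of mask below nbits is set); A returns normally everywhere else.
def Pre_reverse_xor_leftshift_mask (y : Int) (shift : Int) (nbits : Int) (mask : Int) : Prop :=
  0 ≤ shift ∨ nbits ≤ 0 ∨ PySem.Int.band mask (((1 : Int) <<< nbits.toNat) - 1) = 0
instance (y : Int) (shift : Int) (nbits : Int) (mask : Int) : Decidable (Pre_reverse_xor_leftshift_mask y shift nbits mask) := by unfold Pre_reverse_xor_leftshift_mask; infer_instance

def pvWitness_reverse_xor_leftshift_mask : Int × Int × Int × Int := (23, 2, 6, 45)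

def Spec_reverse_xor_leftshift_mask (y : Int) (shift : Int) (nbits : Int) (mask : Int) (out : Int) : Prop := out = reverse_xor_leftshift_mask_alt y shift nbits mask
instance (y : Int) (shift : Int) (nbits : Int) (mask : Int) (out : Int) : Decidable (Spec_reverse_xor_leftshift_mask y shift nbits mask out) := by unfold Spec_reverse_xor_leftshift_mask; infer_instance

-- ===== CLAIM (what is proved, stated in full; the proofs are below) =====
def Claim_equal_reverse_xor_leftshift_mask : Prop := ∀ (y : Int) (shift : Int) (nbits : Int) (mask : Int), Dom_reverse_xor_leftshift_mask y shift nbits mask → Pre_reverse_xor_leftshift_mask y shift nbits mask → Spec_reverse_xor_leftshift_mask y shift nbits mask (reverse_xor_leftshift_mask y shift nbits mask)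

-- ===== LEMMAS AND PROOFS =====

theorem pv_and_mod_two (m n : Nat) : (m &&& n) % 2 = m % 2 &&& n % 2 := by
  simpa using (Nat.and_mod_two_pow (a := m) (b := n) (n := 1))

theorem pv_sub_and_testBit (i : Nat) : ∀ m n : Nat,
    (m - (m &&& n)).testBit i = (m.testBit i && !(n.testBit i)) := by
  induction i with
  | zero =>
    intro m n
    have h1 := pv_and_mod_two m n
    have h2 : m &&& n ≤ m := Nat.and_le_left
    simp only [Nat.testBit_zero]
    rcases Nat.mod_two_eq_zero_or_one m with hm | hm <;>
      rcases Nat.mod_two_eq_zero_or_one n with hn | hn <;>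
      rw [hm, hn] at h1 <;> simp only [show (0:Nat) &&& 0 = 0 from rfl,
        show (0:Nat) &&& 1 = 0 from rfl, show (1:Nat) &&& 0 = 0 from rfl,
        show (1:Nat) &&& 1 = 1 from rfl] at h1 <;> simp [hm, hn] <;> omega
  | succ i ih =>
    intro m n
    have h1 := pv_and_mod_two m n
    have h2 : m &&& n ≤ m := Nat.and_le_left
    have hdiv : (m - (m &&& n)) / 2 = m / 2 - (m &&& n) / 2 := by
      rcases Nat.mod_two_eq_zero_or_one m with hm | hm <;>
        rcases Nat.mod_two_eq_zero_or_one n with hn | hn <;>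
        rw [hm, hn] at h1 <;> simp only [show (0:Nat) &&& 0 = 0 from rfl,
          show (0:Nat) &&& 1 = 0 from rfl, show (1:Nat) &&& 0 = 0 from rfl,
          show (1:Nat) &&& 1 = 1 from rfl] at h1 <;> omega
    rw [← Nat.testBit_div_two, hdiv, Nat.and_div_two, ih,
      Nat.testBit_div_two, Nat.testBit_div_two]

-- bit i of a Python integer (infinite two's complement)
def pvTb (a : Int) (i : Nat) : Bool :=
  match a with
  | .ofNat m => m.testBit i
  | .negSucc m => !(m.testBit i)

theorem pvTb_natCast (m : Nat) (i : Nat) : pvTb (m : Int) i = m.testBit i := rfl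

theorem pvTb_band (a : Int) (b : Int) (hb : 0 ≤ b) (i : Nat) :
    pvTb (PySem.Int.band a b) i = (pvTb a i && pvTb b i) := by
  cases a with
  | ofNat m =>
    cases b with
    | ofNat n =>
      show pvTb (PySem.Int.band (m : Int) (n : Int)) i = _
      rw [PySem.Int.band_of_nonneg (by positivity) (by positivity)]
      show (Int.toNat m &&& Int.toNat n).testBit i = (m.testBit i && n.testBit i)
      rw [show Int.toNat (m : Int) = m from rfl, show Int.toNat (n : Int) = n from rfl]
      exact Nat.testBit_and m n i
    | negSucc n => simp at hb
  | negSucc m =>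
    cases b with
    | ofNat n =>
      have h0 : ¬ (0 ≤ Int.negSucc m) := by omega
      simp only [PySem.Int.band, h0, if_false, if_pos hb]
      rw [show (-(Int.negSucc m) - 1).toNat = m by rw [Int.negSucc_eq]; omega]
      rw [show (Int.ofNat n).toNat = n from rfl]
      show (n - (n &&& m)).testBit i = (!(m.testBit i) && n.testBit i)
      rw [pv_sub_and_testBit, Bool.and_comm]
    | negSucc n => simp at hb

theorem pvTb_bxor (a b : Int) (ha : 0 ≤ a) (hb : 0 ≤ b) (i : Nat) :
    pvTb (PySem.Int.bxor a b) i = xor (pvTb a i) (pvTb b i) := by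
  rw [PySem.Int.bxor_of_nonneg ha hb]
  rw [pvTb_natCast, Nat.testBit_xor]
  lift a to Nat using ha
  lift b to Nat using hb
  rw [show (a : Int).toNat = a from rfl, show (b : Int).toNat = b from rfl]
  rfl

theorem pvTb_bor (a b : Int) (ha : 0 ≤ a) (hb : 0 ≤ b) (i : Nat) :
    pvTb (PySem.Int.bor a b) i = (pvTb a i || pvTb b i) := by
  rw [PySem.Int.bor_of_nonneg ha hb]
  rw [pvTb_natCast, Nat.testBit_or]
  lift a to Nat using ha
  lift b to Nat using hb
  rfl

theorem pv_band_nonneg (a b : Int) (hb : 0 ≤ b) : 0 ≤ PySem.Int.band a b :=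
  PySem.Int.band_comm a b ▸ PySem.Int.band_nonneg_of_nonneg_left a hb

theorem pv_bxor_nonneg (a b : Int) (ha : 0 ≤ a) (hb : 0 ≤ b) : 0 ≤ PySem.Int.bxor a b := by
  rw [PySem.Int.bxor_of_nonneg ha hb]; positivity

theorem pv_bor_nonneg (a b : Int) (ha : 0 ≤ a) (hb : 0 ≤ b) : 0 ≤ PySem.Int.bor a b := by
  rw [PySem.Int.bor_of_nonneg ha hb]; positivity

theorem pv_natCast_shiftLeft (m : Nat) (s : Nat) : ((m : Int) <<< s) = ((m <<< s : Nat) : Int) := rfl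

theorem pvTb_shiftLeft (a : Int) (ha : 0 ≤ a) (s i : Nat) :
    pvTb (a <<< s) i = (decide (s ≤ i) && pvTb a (i - s)) := by
  lift a to Nat using ha
  rw [pv_natCast_shiftLeft, pvTb_natCast, pvTb_natCast, Nat.testBit_shiftLeft]

theorem pv_shiftLeft_nonneg (a : Int) (ha : 0 ≤ a) (s : Nat) : 0 ≤ a <<< s := by
  lift a to Nat using ha
  rw [pv_natCast_shiftLeft]
  positivity

theorem pvTb_one_shift (n i : Nat) : pvTb ((1 : Int) <<< n) i = decide (i = n) := by
  rw [show ((1:Int) <<< n) = ((1 <<< n : Nat) : Int) from rfl, pvTb_natCast]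
  rw [Nat.shiftLeft_eq, one_mul, Nat.testBit_two_pow]
  simp [eq_comm]

theorem pvTb_zero (i : Nat) : pvTb 0 i = false := by
  rw [show (0 : Int) = ((0 : Nat) : Int) from rfl, pvTb_natCast, Nat.zero_testBit]

theorem pv_eq_of_tb (a b : Int) (ha : 0 ≤ a) (hb : 0 ≤ b)
    (h : ∀ i, pvTb a i = pvTb b i) : a = b := by
  lift a to Nat using ha
  lift b to Nat using hb
  have : a = b := Nat.eq_of_testBit_eq fun i => by
    have := h i; rwa [pvTb_natCast, pvTb_natCast] at this
  exact_mod_cast this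

theorem pvTb_two_pow_sub_one (n i : Nat) : pvTb ((1 : Int) <<< n - 1) i = decide (i < n) := by
  have h1 : ((1:Int) <<< n) = ((1 <<< n : Nat) : Int) := rfl
  have h2 : (1:Nat) ≤ 1 <<< n := by rw [Nat.one_shiftLeft]; exact Nat.one_le_two_pow
  have e : pvTb ((1:Int) <<< n - 1) i = pvTb ((1 <<< n - 1 : Nat) : Int) i := by
    congr 1
    rw [h1]
    omega
  rw [e, pvTb_natCast, Nat.one_shiftLeft, Nat.testBit_two_pow_sub_one]

-- the intended bit recurrence: bit b of the solution x of y = ((x << shift) & mask) ^ x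
def pvZ (y : Int) (mask : Int) (shift : Int) (b : Nat) : Bool :=
  xor (pvTb y b)
    (pvTb mask b &&
      (if _h : 1 ≤ shift ∧ shift ≤ (b : Int) then pvZ y mask shift (b - shift.toNat) else false))
termination_by b
decreasing_by omega

theorem pvZ_eq (y mask shift : Int) (b : Nat) :
    pvZ y mask shift b = xor (pvTb y b)
      (pvTb mask b &&
        (if 1 ≤ shift ∧ shift ≤ (b : Int) then pvZ y mask shift (b - shift.toNat) else false)) := by
  rw [pvZ]
  by_cases h : 1 ≤ shift ∧ shift ≤ (b : Int) <;> simp [h]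

theorem pv_band_bit_eq_zero_iff (a : Int) (k : Nat) :
    PySem.Int.band a ((1:Int) <<< k) = 0 ↔ pvTb a k = false := by
  have hb : (0:Int) ≤ (1:Int) <<< k := pv_shiftLeft_nonneg 1 (by norm_num) k
  constructor
  · intro h
    have := pvTb_band a ((1:Int) <<< k) hb k
    rw [h, pvTb_zero, pvTb_one_shift] at this
    simpa using this.symm
  · intro h
    apply pv_eq_of_tb _ _ (pv_band_nonneg a _ hb) le_rfl
    intro i
    rw [pvTb_band a _ hb, pvTb_one_shift, pvTb_zero]
    by_cases hik : i = k
    · subst hik; simp [h]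
    · simp [hik]

-- A's loop body and its partial folds (proof-side restatement of port A's lambda)
def pvAStep (y shift mask : Int) (x b : Int) : Int :=
  if b < shift ∨ ¬ (PySem.Int.band mask ((1 : Int) <<< b.toNat) ≠ 0) then
    PySem.Int.bor x (PySem.Int.band y ((1 : Int) <<< b.toNat))
  else if PySem.Int.band mask ((1 : Int) <<< b.toNat) ≠ 0 then
    PySem.Int.bor x (PySem.Int.bxor (PySem.Int.band y ((1 : Int) <<< b.toNat))
      (PySem.Int.band (x <<< shift.toNat) ((1 : Int) <<< b.toNat)))
  else x

def pvAFold (y shift mask : Int) (k : Nat) : Int :=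
  ((List.range k).map (fun j => (j : Int))).foldl (pvAStep y shift mask) 0

theorem pvAFold_succ (y shift mask : Int) (k : Nat) :
    pvAFold y shift mask (k+1) = pvAStep y shift mask (pvAFold y shift mask k) (k : Int) := by
  simp [pvAFold, List.range_succ]

theorem pvAFold_char (y shift mask : Int) (k : Nat) :
    0 ≤ pvAFold y shift mask k ∧
      ∀ i, pvTb (pvAFold y shift mask k) i = (decide (i < k) && pvZ y mask shift i) := by
  induction k with
  | zero => exact ⟨le_rfl, fun i => by simp [pvAFold, pvTb_zero]⟩
  | succ k ih =>
    obtain ⟨hx, hbits⟩ := ih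
    set x := pvAFold y shift mask k with hxdef
    have htn : ((k:Int)).toNat = k := Int.toNat_natCast k
    have hbit : (0:Int) ≤ (1:Int) <<< k := pv_shiftLeft_nonneg 1 (by norm_num) _
    rw [pvAFold_succ]
    unfold pvAStep
    rw [htn]
    by_cases hc : (k:Int) < shift ∨ ¬ (PySem.Int.band mask ((1 : Int) <<< k) ≠ 0)
    · rw [if_pos hc]
      have hyb := pv_band_nonneg y _ hbit
      refine ⟨pv_bor_nonneg _ _ hx hyb, fun i => ?_⟩
      rw [pvTb_bor _ _ hx hyb, pvTb_band y _ hbit, pvTb_one_shift, hbits]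
      by_cases hik : i = k
      · subst hik
        have hzk : pvZ y mask shift i = pvTb y i := by
          rw [pvZ_eq]
          rcases hc with hlt | hm0
          · rw [if_neg (by omega)]; simp
          · rw [not_not, pv_band_bit_eq_zero_iff] at hm0
            simp [hm0]
        simp [hzk]
      · rw [decide_eq_false hik]
        rw [show decide (i < k + 1) = decide (i < k) from decide_eq_decide.mpr (by omega)]
        simp
    · rw [if_neg hc]
      obtain ⟨hsk', hm⟩ := not_or.mp hc
      rw [not_not] at hm
      have hsk : shift ≤ (k:Int) := by omega
      rw [if_pos hm]
      have hxs := pv_shiftLeft_nonneg x hx shift.toNat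
      have hyb := pv_band_nonneg y _ hbit
      have hxsb := pv_band_nonneg (x <<< shift.toNat) _ hbit
      have hxor := pv_bxor_nonneg _ _ hyb hxsb
      refine ⟨pv_bor_nonneg _ _ hx hxor, fun i => ?_⟩
      rw [pvTb_bor _ _ hx hxor, pvTb_bxor _ _ hyb hxsb, pvTb_band y _ hbit,
        pvTb_band _ _ hbit, pvTb_shiftLeft x hx, pvTb_one_shift, hbits]
      have hmk : pvTb mask k = true := by
        by_cases h : pvTb mask k = true
        · exact h
        · exact absurd ((pv_band_bit_eq_zero_iff mask k).2 (by simpa using h)) hm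
      by_cases hik : i = k
      · subst hik
        rw [decide_eq_true rfl, decide_eq_true (show i < i + 1 by omega)]
        by_cases hs1 : 1 ≤ shift
        · have hsle : shift.toNat ≤ i := by omega
          have hlt : i - shift.toNat < i := by omega
          rw [pvZ_eq, hmk, if_pos ⟨hs1, hsk⟩, hbits,
            decide_eq_true hsle, decide_eq_true hlt]
          simp
        · have hs0 : shift.toNat = 0 := by omega
          rw [pvZ_eq, hmk, if_neg (by omega), hs0]
          rw [Nat.sub_zero, hbits]
          simp
      · rw [decide_eq_false hik]
        rw [show decide (i < k + 1) = decide (i < k) from decide_eq_decide.mpr (by omega)]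
        simp

-- the affine map t ↦ v ^ ((t << s) & m); B's loop state (v, m, s) represents an iterate of it
def pvGmap (v m : Int) (s : Nat) (t : Int) : Int :=
  PySem.Int.bxor v (PySem.Int.band (t <<< s) m)

theorem pvGmap_apply (v m : Int) (s : Nat) (t : Int) :
    pvGmap v m s t = PySem.Int.bxor v (PySem.Int.band (t <<< s) m) := rfl

theorem pvGmap_zero (v m : Int) (hv : 0 ≤ v) (hm : 0 ≤ m) (s : Nat) : pvGmap v m s 0 = v := by
  unfold pvGmap
  rw [show ((0:Int) <<< s) = 0 from by rw [show (0:Int) = ((0:Nat):Int) from rfl, pv_natCast_shiftLeft]; simp]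
  rw [show PySem.Int.band 0 m = 0 from by rw [PySem.Int.band_of_nonneg le_rfl hm]; simp]
  rw [PySem.Int.bxor_of_nonneg hv le_rfl]
  simp
  omega

theorem pvGmap_nonneg (v m : Int) (hv : 0 ≤ v) (hm : 0 ≤ m) (s : Nat) (t : Int) :
    0 ≤ pvGmap v m s t :=
  pv_bxor_nonneg _ _ hv (pv_band_nonneg _ _ hm)

theorem pvGmap_comp (v m : Int) (hv : 0 ≤ v) (hm : 0 ≤ m) (s : Nat) (t : Int) (ht : 0 ≤ t) :
    pvGmap (PySem.Int.bxor v (PySem.Int.band (v <<< s) m)) (PySem.Int.band m (m <<< s)) (2*s) t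
      = pvGmap v m s (pvGmap v m s t) := by
  have hvs := pv_shiftLeft_nonneg v hv s
  have hms := pv_shiftLeft_nonneg m hm s
  have hts := pv_shiftLeft_nonneg t ht s
  have hv' := pv_bxor_nonneg _ _ hv (pv_band_nonneg (v <<< s) m hm)
  have hm' := pv_band_nonneg m (m <<< s) hms
  have hinner := pvGmap_nonneg v m hv hm s t
  apply pv_eq_of_tb _ _ (pvGmap_nonneg _ _ hv' hm' _ _) (pvGmap_nonneg _ _ hv hm _ _)
  intro i
  unfold pvGmap
  rw [pvTb_bxor _ _ hv' (pv_band_nonneg _ _ hm'),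
      pvTb_band _ _ hm', pvTb_shiftLeft t ht,
      pvTb_band _ _ hms, pvTb_shiftLeft m hm,
      pvTb_bxor _ _ hv (pv_band_nonneg _ _ hm),
      pvTb_band _ _ hm, pvTb_shiftLeft v hv,
      pvTb_bxor _ _ hv (pv_band_nonneg _ _ hm),
      pvTb_band _ _ hm,
      pvTb_shiftLeft _ (pv_bxor_nonneg _ _ hv (pv_band_nonneg _ _ hm)) s i,
      pvTb_bxor _ _ hv (pv_band_nonneg _ _ hm),
      pvTb_band _ _ hm, pvTb_shiftLeft t ht]
  by_cases h1 : s ≤ i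
  · by_cases h2 : 2*s ≤ i
    · have e1 : decide (s ≤ i) = true := decide_eq_true h1
      have e2 : decide (2*s ≤ i) = true := decide_eq_true h2
      have e3 : decide (s ≤ i - s) = true := decide_eq_true (by omega)
      have e4 : i - s - s = i - 2*s := by omega
      rw [e1, e2, e3, e4]
      cases pvTb v i <;> cases pvTb m i <;> cases pvTb v (i - s) <;>
        cases pvTb m (i - s) <;> cases pvTb t (i - 2*s) <;> rfl
    · have e1 : decide (s ≤ i) = true := decide_eq_true h1
      have e2 : decide (2*s ≤ i) = false := decide_eq_false (by omega)
      have e3 : decide (s ≤ i - s) = false := decide_eq_false (by omega)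
      rw [e1, e2, e3]
      cases pvTb v i <;> cases pvTb m i <;> cases pvTb v (i - s) <;>
        cases pvTb m (i - s) <;> rfl
  · have e1 : decide (s ≤ i) = false := decide_eq_false h1
    have e2 : decide (2*s ≤ i) = false := decide_eq_false (by omega)
    rw [e1, e2]
    cases pvTb v i <;> rfl


theorem pv_iter_nonneg (y' m' : Int) (hy0 : 0 ≤ y') (hm0 : 0 ≤ m') (s : Nat) (n : Nat) :
    0 ≤ (pvGmap y' m' s)^[n] 0 := by
  induction n with
  | zero => simp
  | succ n ih => rw [Function.iterate_succ_apply']; exact pvGmap_nonneg _ _ hy0 hm0 _ _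

theorem pv_iter_nonneg' (y' m' : Int) (hy0 : 0 ≤ y') (hm0 : 0 ≤ m') (s : Nat) (n : Nat)
    (t : Int) (ht : 0 ≤ t) : 0 ≤ (pvGmap y' m' s)^[n] t := by
  induction n with
  | zero => simpa
  | succ n ih => rw [Function.iterate_succ_apply']; exact pvGmap_nonneg _ _ hy0 hm0 _ _

theorem pv_iter_char (y mask shift : Int) (hs1 : 1 ≤ shift) (N : Nat) (y' m' : Int)
    (hy0 : 0 ≤ y') (hm0 : 0 ≤ m')
    (hy : ∀ i, i < N → pvTb y' i = pvTb y i) (hm : ∀ i, i < N → pvTb m' i = pvTb mask i) :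
    ∀ n i, i < n * shift.toNat → i < N →
      pvTb ((pvGmap y' m' shift.toNat)^[n] 0) i = pvZ y mask shift i := by
  intro n
  induction n with
  | zero => intro i h; omega
  | succ n ih =>
    intro i hin hiN
    rw [Nat.succ_mul] at hin
    rw [Function.iterate_succ_apply']
    have hX := pv_iter_nonneg y' m' hy0 hm0 shift.toNat n
    rw [pvGmap_apply]
    rw [pvTb_bxor _ _ hy0 (pv_band_nonneg _ _ hm0), pvTb_band _ _ hm0,
      pvTb_shiftLeft _ hX, hy i hiN, hm i hiN]
    by_cases hsle : shift.toNat ≤ i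
    · have h1 : i - shift.toNat < n * shift.toNat := by omega
      have h2 : i - shift.toNat < N := by omega
      rw [decide_eq_true hsle, ih _ h1 h2]
      rw [pvZ_eq y mask shift i, if_pos ⟨hs1, by omega⟩]
      cases pvTb y i <;> cases pvTb mask i <;> cases pvZ y mask shift (i - shift.toNat) <;> rfl
    · rw [decide_eq_false hsle]
      rw [pvZ_eq y mask shift i, if_neg (by omega)]
      cases pvTb y i <;> cases pvTb mask i <;> rfl

-- one unfolding step of B's loop, plus the invariant: (v, m, s) represents the n-fold
-- iterate of the original map t ↦ y' ^ ((t << shift) & m'), and s ≤ n * shift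
theorem pv_altLoop_char (nbits y' m' : Int) (hy0 : 0 ≤ y') (hm0 : 0 ≤ m')
    (shift : Int) :
    ∀ (fuel : Nat) (v m s : Int) (hs : 1 ≤ s), (nbits - s).toNat ≤ fuel → 0 ≤ v → 0 ≤ m →
      ∀ (n : Nat), 1 ≤ n →
        (∀ t, 0 ≤ t → pvGmap v m s.toNat t = (pvGmap y' m' shift.toNat)^[n] t) →
        s ≤ (n : Int) * shift →
        ∃ n' : Nat, 1 ≤ n' ∧ nbits ≤ (n' : Int) * shift ∧
          pvAltLoop nbits v m s hs = (pvGmap y' m' shift.toNat)^[n'] 0 := by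
  intro fuel
  induction fuel with
  | zero =>
    intro v m s hs hfuel hv hm n hn1 hgm hns
    rw [pvAltLoop, dif_neg (by omega)]
    exact ⟨n, hn1, by omega, by rw [← hgm 0 le_rfl, pvGmap_zero v m hv hm]⟩
  | succ fuel ih =>
    intro v m s hs hfuel hv hm n hn1 hgm hns
    rw [pvAltLoop]
    by_cases hlt : s < nbits
    · rw [dif_pos hlt]
      have hsn : (2 * s).toNat = 2 * s.toNat := by omega
      have hvs := pv_shiftLeft_nonneg v hv s.toNat
      have hms := pv_shiftLeft_nonneg m hm s.toNat
      refine ih _ _ _ _ (by omega)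
        (pv_bxor_nonneg _ _ hv (pv_band_nonneg _ _ hm)) (pv_band_nonneg _ _ hms)
        (n + n) (by omega) ?_ (by push_cast; nlinarith [hns])
      intro t ht
      rw [hsn, pvGmap_comp v m hv hm s.toNat t ht,
        hgm t ht, hgm _ (pv_iter_nonneg' y' m' hy0 hm0 shift.toNat n t ht),
        ← Function.iterate_add_apply]
    · rw [dif_neg hlt]
      exact ⟨n, hn1, by omega, by rw [← hgm 0 le_rfl, pvGmap_zero v m hv hm]⟩

-- bits of B's result, shift ≥ 1 case
theorem pv_alt_bits_pos (y shift nbits mask : Int) (hs1 : 1 ≤ shift) :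
    ∀ i, pvTb (reverse_xor_leftshift_mask_alt y shift nbits mask) i
      = (decide (i < nbits.toNat) && pvZ y mask shift i) := by
  intro i
  unfold reverse_xor_leftshift_mask_alt
  rw [dif_neg (by omega)]
  set full : Int := if 0 < nbits then ((1 : Int) <<< nbits.toNat) - 1 else 0 with hfull
  have hfn : 0 ≤ full := by
    rw [hfull]; split
    · have : (1:Int) <<< nbits.toNat = ((1 <<< nbits.toNat : Nat) : Int) := rfl
      rw [this]
      have : (1:Nat) ≤ 1 <<< nbits.toNat := by
        rw [Nat.one_shiftLeft]; exact Nat.one_le_two_pow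
      omega
    · exact le_rfl
  have hfbit : ∀ j, pvTb full j = decide (j < nbits.toNat) := by
    intro j
    rw [hfull]; split
    · exact pvTb_two_pow_sub_one nbits.toNat j
    · rw [pvTb_zero]
      have : nbits.toNat = 0 := by omega
      simp [this]
  have hy0 : 0 ≤ PySem.Int.band y full := pv_band_nonneg _ _ hfn
  have hm0 : 0 ≤ PySem.Int.band mask full := pv_band_nonneg _ _ hfn
  obtain ⟨n', hn1, hns, heq⟩ := pv_altLoop_char nbits _ _ hy0 hm0 shift
    (nbits - shift).toNat _ _ shift (by omega) le_rfl hy0 hm0 1 le_rfl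
    (fun t ht => by rw [Function.iterate_one]) (by omega)
  rw [heq]
  by_cases hiN : i < nbits.toNat
  · rw [decide_eq_true hiN, Bool.true_and]
    have hsc : (shift.toNat : Int) = shift := Int.toNat_of_nonneg (by omega)
    have h5 : nbits.toNat ≤ n' * shift.toNat := Int.toNat_le.mpr (by push_cast [hsc]; exact hns)
    refine pv_iter_char y mask shift hs1 nbits.toNat _ _ hy0 hm0 ?_ ?_ n' i (by omega) hiN
    · intro j hj
      rw [pvTb_band _ _ hfn, hfbit, decide_eq_true hj, Bool.and_true]
    · intro j hj
      rw [pvTb_band _ _ hfn, hfbit, decide_eq_true hj, Bool.and_true]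
  · rw [decide_eq_false hiN, Bool.false_and]
    obtain ⟨n'', rfl⟩ : ∃ n'', n' = n'' + 1 := ⟨n' - 1, by omega⟩
    rw [Function.iterate_succ_apply']
    rw [pvGmap_apply]
    rw [pvTb_bxor _ _ hy0 (pv_band_nonneg _ _ hm0), pvTb_band _ _ hm0,
      pvTb_band _ _ hfn, pvTb_band _ _ hfn, hfbit, decide_eq_false hiN]
    simp

-- bits of A's result
theorem pv_a_bits (y shift nbits mask : Int) :
    0 ≤ reverse_xor_leftshift_mask y shift nbits mask ∧
    ∀ i, pvTb (reverse_xor_leftshift_mask y shift nbits mask) i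
      = (decide (i < nbits.toNat) && pvZ y mask shift i) := by
  have : reverse_xor_leftshift_mask y shift nbits mask = pvAFold y shift mask nbits.toNat := by
    unfold reverse_xor_leftshift_mask pvAFold pvAStep
    rw [PySem.List.pyRange_one]
    simp
    have hl : List.flatMap (fun a : Nat => [(a : Int)]) (List.range nbits.toNat)
        = List.map (fun a : Nat => (a : Int)) (List.range nbits.toNat) := by
      induction List.range nbits.toNat with
      | nil => rfl
      | cons a l ih => simp [ih]
    rw [hl]
  rw [this]
  exact pvAFold_char y shift mask nbits.toNat

-- B's result is nonnegative
theorem pv_alt_nonneg (y shift nbits mask : Int) :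
    0 ≤ reverse_xor_leftshift_mask_alt y shift nbits mask := by
  unfold reverse_xor_leftshift_mask_alt
  set full : Int := if 0 < nbits then ((1 : Int) <<< nbits.toNat) - 1 else 0 with hfull
  have hfn : 0 ≤ full := by
    rw [hfull]; split
    · have h1 : (1:Int) <<< nbits.toNat = ((1 <<< nbits.toNat : Nat) : Int) := rfl
      have h2 : (1:Nat) ≤ 1 <<< nbits.toNat := by
        rw [Nat.one_shiftLeft]; exact Nat.one_le_two_pow
      rw [h1]; omega
    · exact le_rfl
  by_cases h : shift ≤ 0
  · rw [dif_pos h]; exact pv_band_nonneg _ _ hfn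
  · rw [dif_neg h]
    have hy0 : 0 ≤ PySem.Int.band y full := pv_band_nonneg _ _ hfn
    have hm0 : 0 ≤ PySem.Int.band mask full := pv_band_nonneg _ _ hfn
    obtain ⟨n', hn1, hns, heq⟩ := pv_altLoop_char nbits _ _ hy0 hm0 shift
      (nbits - shift).toNat _ _ shift (by omega) le_rfl hy0 hm0 1 le_rfl
      (fun t ht => by rw [Function.iterate_one]) (by omega)
    rw [heq]
    exact pv_iter_nonneg _ _ hy0 hm0 _ _

-- bits of B's result, shift ≤ 0 case
theorem pv_alt_bits_nonpos (y shift nbits mask : Int) (hs : shift ≤ 0) :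
    ∀ i, pvTb (reverse_xor_leftshift_mask_alt y shift nbits mask) i
      = (decide (i < nbits.toNat) && pvZ y mask shift i) := by
  intro i
  unfold reverse_xor_leftshift_mask_alt
  rw [dif_pos hs]
  set full : Int := if 0 < nbits then ((1 : Int) <<< nbits.toNat) - 1 else 0 with hfull
  have hfn : 0 ≤ full := by
    rw [hfull]; split
    · have h1 : (1:Int) <<< nbits.toNat = ((1 <<< nbits.toNat : Nat) : Int) := rfl
      have h2 : (1:Nat) ≤ 1 <<< nbits.toNat := by
        rw [Nat.one_shiftLeft]; exact Nat.one_le_two_pow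
      rw [h1]; omega
    · exact le_rfl
  have hfbit : ∀ j, pvTb full j = decide (j < nbits.toNat) := by
    intro j
    rw [hfull]; split
    · exact pvTb_two_pow_sub_one nbits.toNat j
    · rw [pvTb_zero]
      have : nbits.toNat = 0 := by omega
      simp [this]
  rw [pvTb_band _ _ hfn, hfbit]
  rw [pvZ_eq, if_neg (by omega)]
  cases pvTb y i <;> cases pvTb mask i <;> cases decide (i < nbits.toNat) <;> rfl

-- ===== VERDICT (by name: the statement is the Claim_ definition above) =====
theorem reverse_xor_leftshift_mask_spec : Claim_equal_reverse_xor_leftshift_mask := by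
  intro y shift nbits mask _hdom _hpre
  unfold Spec_reverse_xor_leftshift_mask
  obtain ⟨hA0, hAbits⟩ := pv_a_bits y shift nbits mask
  refine pv_eq_of_tb _ _ hA0 (pv_alt_nonneg y shift nbits mask) (fun i => ?_)
  rw [hAbits i]
  by_cases hs : shift ≤ 0
  · rw [pv_alt_bits_nonpos y shift nbits mask hs i]
  · rw [pv_alt_bits_pos y shift nbits mask (by omega) i]
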